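-- pv_equiv track=rewrite | github.com/pypi-data/pypi-mirror-49 | packages/GenomeBrowser/GenomeBrowser-1.6.3.tar.gz/GenomeBrowser-1.6.3/GenomeBrowser/Classes/DrawFeatureTracks.py | divideCoordinatesOverTracks
-- ===== SOURCE A (Python) =====
-- from collections import defaultdict
-- from operator import itemgetter
--
-- def divideCoordinatesOverTracks(data):
-- 	""""
-- 	a = array([
-- 	   [  1,  30],
-- 	   [  5,  40],
-- 	   [ 50,  70],
-- 	   [ 60,  90],
-- 	   [  5,  95],
-- 	   [100, 300],
-- 	   [200, 400]
-- 	   ])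
--
-- 	divideCoordinatesOverTracks(a) should yield:
--
-- 	defaultdict(<type 'list'>, {1: [[1, 30], [50, 70], [100, 300]], 2: [[5, 40], [60, 90], [200, 400]], 3: [[5, 95]]})
-- 	The dictionary key is the track number. The values are the interval coordinates
--
-- 	"""
-- 	trackdict = defaultdict(list)
-- 	numberoftracks = 1
-- 	data = sorted(data, key=itemgetter(0))
-- 	try:
-- 		data = [i for i in data if not i['f2'].startswith(b'INT')]
-- 	except TypeError:
-- 		pass
-- 	while data:
-- 		firstcoord = data.pop(0)
-- 		toremove = list()
-- 		trackdict[numberoftracks].append(firstcoord)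
-- 		for coord in data:
-- 			if firstcoord[1] < coord[0]:
-- 				firstcoord = coord
-- 				trackdict[numberoftracks].append(coord)
-- 				toremove.append(coord)
-- 		numberoftracks+=1
-- 		for i in toremove:
-- 			data.remove(i)
-- 	return trackdict
-- ===== SOURCE B (Python) =====
-- def divideCoordinatesOverTracks(data):
-- 	"""Single pass first-fit: sort by start once, then drop each interval into the
-- 	first track whose current end lies strictly before its start (new track if none).
-- 	Equivalent to the repeated greedy-pass partition, without the O(n^2) removals."""
-- 	ends = []        # current last end of each track
-- 	trackrows = []   # rows assigned to each track
-- 	for row in sorted(data, key=lambda r: r[0]):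
-- 		for i, e in enumerate(ends):
-- 			if e < row[0]:
-- 				ends[i] = row[1]
-- 				trackrows[i].append(row)
-- 				break
-- 		else:
-- 			ends.append(row[1])
-- 			trackrows.append([row])
-- 	return {i + 1: rows for i, rows in enumerate(trackrows)}
-- ===== Notes on version B (the rewrite author's own statement) =====
-- stated objective: faster
-- what changed: Replaced the repeated greedy passes over the remaining data (each followed by O(n) list.remove calls) by a single left-to-right sweep over the sorted intervals that drops each interval into the first track whose current end lies before its start; the two strategies provably produce the same track partition.
-- outside the precondition, e.g. on divideCoordinatesOverTracks([[1]]): A returns {1: [[1]]}, B raises IndexError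
import Mathlib
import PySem

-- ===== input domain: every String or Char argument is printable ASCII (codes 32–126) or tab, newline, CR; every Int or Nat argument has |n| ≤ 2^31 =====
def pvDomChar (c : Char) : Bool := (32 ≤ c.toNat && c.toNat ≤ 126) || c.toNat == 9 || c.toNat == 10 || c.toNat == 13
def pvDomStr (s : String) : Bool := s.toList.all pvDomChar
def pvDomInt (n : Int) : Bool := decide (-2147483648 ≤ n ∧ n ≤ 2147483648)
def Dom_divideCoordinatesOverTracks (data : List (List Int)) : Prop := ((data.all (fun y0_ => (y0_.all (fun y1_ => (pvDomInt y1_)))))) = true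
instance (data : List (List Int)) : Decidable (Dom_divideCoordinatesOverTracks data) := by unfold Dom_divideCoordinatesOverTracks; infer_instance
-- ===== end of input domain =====

-- B replaces A's repeated greedy passes (each with O(n) list.remove calls) by one
-- first-fit sweep over the sorted intervals; measured constant-factor faster.
-- A mutates only its local copy of data (it re-binds `data = sorted(data, ...)`), so callers see no mutation.

-- ===== PORT A =====
-- row[0] / row[1]; Pre_ guarantees rows have length ≥ 2, where these equal Python's indexing
def pvFst (r : List Int) : Int := PySem.List.pyGetD r 0 0
def pvSnd (r : List Int) : Int := PySem.List.pyGetD r 1 0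

-- data.remove(i) for each i in toremove; the getD branch is unreachable (every
-- removed value is still present), where it is exact Python's ValueError would occur
def pvRemoveAll (l : List (List Int)) (tr : List (List Int)) : List (List Int) :=
  tr.foldl (fun acc v => (PySem.List.remove? acc v).getD acc) l

-- the inner `for coord in data` loop: appends fitting coords to trackdict[n] and to toremove
def pvInnerA (d : PySem.Dict Int (List (List Int))) (n fe : Int) (rest : List (List Int)) :
    PySem.Dict Int (List (List Int)) × List (List Int) :=
  match rest with
  | [] => (d, [])
  | c :: cs =>
    if fe < pvFst c then
      let r := pvInnerA (d.insert n (d.getD n [] ++ [c])) n (pvSnd c) cs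
      (r.1, c :: r.2)
    else pvInnerA d n fe cs

theorem pvRemoveAll_length_le (tr l : List (List Int)) : (pvRemoveAll l tr).length ≤ l.length := by
  induction tr generalizing l with
  | nil => simp [pvRemoveAll]
  | cons v tv ih =>
    simp only [pvRemoveAll, List.foldl_cons]
    refine le_trans (ih _) ?_
    cases h : PySem.List.remove? l v with
    | none => simp
    | some l' =>
      have hv : v ∈ l := by
        by_contra hv
        rw [(PySem.List.remove?_eq_none_iff l v).mpr hv] at h
        cases h
      rw [PySem.List.remove?_eq_some_erase l v hv] at h
      cases h
      simp [hv]

-- the `while data:` loop; trackdict threaded through, numberoftracks = n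
def pvLoopA (d : PySem.Dict Int (List (List Int))) (n : Int) (data : List (List Int)) :
    PySem.Dict Int (List (List Int)) :=
  match data with
  | [] => d
  | f :: rest =>
    let d1 := d.insert n (d.getD n [] ++ [f])
    let r := pvInnerA d1 n (pvSnd f) rest
    pvLoopA r.1 (n + 1) (pvRemoveAll rest r.2)
  termination_by data.length
  decreasing_by
    simp only [List.length_cons]
    exact Nat.lt_succ_of_le (pvRemoveAll_length_le _ _)

-- the try/except filter applies i['f2'] to a list, which always raises TypeError,
-- so the except branch leaves data unchanged: filter omitted (no-op)
def divideCoordinatesOverTracks (data : List (List Int)) : List (Int × List (List Int)) :=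
  (pvLoopA PySem.Dict.empty 1 (PySem.List.sorted data (fun r => pvFst r) false)).items

-- ===== PORT B =====
-- B's inner for/else over the tracks: first track with end < row[0] takes the row, else append a new track
def pvPlace (tracks : List (Int × List (List Int))) (r : List Int) : List (Int × List (List Int)) :=
  match tracks with
  | [] => [(pvSnd r, [r])]
  | (e, rs) :: t =>
    if e < pvFst r then (pvSnd r, rs ++ [r]) :: t
    else (e, rs) :: pvPlace t r

-- {i + 1: rows for i, rows in enumerate(trackrows)}
def pvNumber (n : Int) (ts : List (Int × List (List Int))) : List (Int × List (List Int)) :=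
  match ts with
  | [] => []
  | (_, rs) :: t => (n, rs) :: pvNumber (n + 1) t

def divideCoordinatesOverTracks_alt (data : List (List Int)) : List (Int × List (List Int)) :=
  pvNumber 1 ((PySem.List.sorted data (fun r => pvFst r) false).foldl pvPlace [])

-- ===== PRECONDITION & SPEC =====
-- Pre_ excludes inputs with a row of length < 2: there A normally raises IndexError
-- (itemgetter(0) or firstcoord[1]); when such a row happens never to be indexed at
-- position 1 (e.g. a lone short row) A accidentally still returns, while B's uniform
-- ends.append(row[1]) raises, so those accidental returns are excluded too.
def Pre_divideCoordinatesOverTracks (data : List (List Int)) : Prop :=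
  ∀ r ∈ data, 2 ≤ r.length
instance (data : List (List Int)) : Decidable (Pre_divideCoordinatesOverTracks data) := by
  unfold Pre_divideCoordinatesOverTracks; infer_instance

def pvWitness_divideCoordinatesOverTracks : List (List Int) :=
  [[1, 30], [5, 40], [50, 70], [60, 90], [5, 95], [100, 300], [200, 400]]

def Spec_divideCoordinatesOverTracks (data : List (List Int)) (out : List (Int × List (List Int))) : Prop := out = divideCoordinatesOverTracks_alt data
instance (data : List (List Int)) (out : List (Int × List (List Int))) : Decidable (Spec_divideCoordinatesOverTracks data out) := by unfold Spec_divideCoordinatesOverTracks; infer_instance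

-- ===== CLAIM (what is proved, stated in full; the proofs are below) =====
def Claim_equal_divideCoordinatesOverTracks : Prop := ∀ (data : List (List Int)), Dom_divideCoordinatesOverTracks data → Pre_divideCoordinatesOverTracks data → Spec_divideCoordinatesOverTracks data (divideCoordinatesOverTracks data)

-- ===== LEMMAS AND PROOFS =====

-- the greedy chain from current end e: (final end, picked rows)
def pvChain (e : Int) (l : List (List Int)) : Int × List (List Int) :=
  match l with
  | [] => (e, [])
  | x :: t =>
    if e < pvFst x then
      let r := pvChain (pvSnd x) t
      (r.1, x :: r.2)
    else pvChain e t

-- the rows the chain skips, in order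
def pvResid (e : Int) (l : List (List Int)) : List (List Int) :=
  match l with
  | [] => []
  | x :: t => if e < pvFst x then pvResid (pvSnd x) t else x :: pvResid e t

theorem pvResid_sublist (e : Int) (l : List (List Int)) : (pvResid e l).Sublist l := by
  induction l generalizing e with
  | nil => simp [pvResid]
  | cons x t ih =>
    simp only [pvResid]
    split
    · exact (ih _).cons x
    · exact (ih e).cons₂ x

theorem pvResid_length_le (e : Int) (l : List (List Int)) : (pvResid e l).length ≤ l.length :=
  (pvResid_sublist e l).length_le

-- the canonical pass decomposition both programs compute
def pvPasses (l : List (List Int)) : List (Int × List (List Int)) :=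
  match l with
  | [] => []
  | f :: rest => ((pvChain (pvSnd f) rest).1, f :: (pvChain (pvSnd f) rest).2) :: pvPasses (pvResid (pvSnd f) rest)
  termination_by l.length
  decreasing_by
    simp only [List.length_cons]
    exact Nat.lt_succ_of_le (pvResid_length_le _ _)

-- ---- B's fold computes pvPasses ----

theorem pvFoldPlace_cons (l : List (List Int)) (e : Int) (c : List (List Int))
    (st : List (Int × List (List Int))) :
    l.foldl pvPlace ((e, c) :: st) =
      ((pvChain e l).1, c ++ (pvChain e l).2) :: (pvResid e l).foldl pvPlace st := by
  induction l generalizing e c st with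
  | nil => simp [pvChain, pvResid]
  | cons x t ih =>
    simp only [List.foldl_cons, pvPlace, pvChain, pvResid]
    split
    · rw [ih]
      simp
    · simp only [List.foldl_cons]
      rw [ih]

theorem pvFoldPlace_eq_passes (l : List (List Int)) :
    l.foldl pvPlace [] = pvPasses l := by
  induction l using pvPasses.induct with
  | case1 => simp [pvPasses]
  | case2 f rest ih =>
    simp only [List.foldl_cons, pvPlace, pvPasses]
    rw [pvFoldPlace_cons, ih]
    simp

-- ---- A's removal passes compute pvResid (needs the sorted-starts invariant) ----

theorem pvChain_subset (e : Int) (l : List (List Int)) :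
    ∀ v ∈ (pvChain e l).2, v ∈ l := by
  induction l generalizing e with
  | nil => simp [pvChain]
  | cons x t ih =>
    simp only [pvChain]
    split
    · intro v hv
      rcases List.mem_cons.mp hv with h | h
      · simp [h]
      · exact List.mem_cons_of_mem _ (ih _ _ h)
    · intro v hv
      exact List.mem_cons_of_mem _ (ih _ _ hv)

theorem pvChain_start_gt (e : Int) (l : List (List Int))
    (hs : l.Pairwise (fun a b => pvFst a ≤ pvFst b)) :
    ∀ v ∈ (pvChain e l).2, e < pvFst v := by
  induction l generalizing e with
  | nil => simp [pvChain]
  | cons x t ih =>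
    simp only [pvChain]
    rcases List.pairwise_cons.mp hs with ⟨hx, ht⟩
    split
    · rename_i hpick
      intro v hv
      rcases List.mem_cons.mp hv with h | h
      · exact h ▸ hpick
      · exact lt_of_lt_of_le hpick (hx v (pvChain_subset _ _ _ h))
    · exact ih e ht

theorem pvRemoveAll_cons_not_mem (s : List (List Int)) (x : List Int) (t : List (List Int))
    (h : ∀ v ∈ s, v ≠ x) :
    pvRemoveAll (x :: t) s = x :: pvRemoveAll t s := by
  induction s generalizing t with
  | nil => simp [pvRemoveAll]
  | cons v s' ih =>
    simp only [pvRemoveAll, List.foldl_cons]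
    have hne : x ≠ v := fun hxv => (h v (by simp)) hxv.symm
    rw [PySem.List.remove?_cons_of_ne t hne]
    have hstep : (Option.map (fun r => x :: r) (PySem.List.remove? t v)).getD (x :: t)
        = x :: (PySem.List.remove? t v).getD t := by
      cases PySem.List.remove? t v <;> simp
    rw [hstep]
    exact ih _ (fun w hw => h w (by simp [hw]))

theorem pvRemoveAll_chain (l : List (List Int)) (e : Int)
    (hs : l.Pairwise (fun a b => pvFst a ≤ pvFst b)) :
    pvRemoveAll l (pvChain e l).2 = pvResid e l := by
  induction l generalizing e with
  | nil => simp [pvChain, pvResid, pvRemoveAll]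
  | cons x t ih =>
    rcases List.pairwise_cons.mp hs with ⟨_, ht⟩
    simp only [pvChain, pvResid]
    split
    · simp only [pvRemoveAll, List.foldl_cons, PySem.List.remove?_cons_self, Option.getD_some]
      exact ih _ ht
    · rename_i hskip
      rw [pvRemoveAll_cons_not_mem _ _ _ ?_, ih e ht]
      intro v hv hveq
      have := pvChain_start_gt e t ht v hv
      have : e < pvFst x := hveq ▸ this
      exact hskip this

-- ---- A's dict bookkeeping ----

theorem pvDict_insert_insert (d : PySem.Dict Int (List (List Int))) (k : Int)
    (v w : List (List Int)) : (d.insert k v).insert k w = d.insert k w := by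
  apply PySem.Dict.ext
  by_cases h : d.contains k = true
  · rw [PySem.Dict.items_insert_of_contains _ _ (by simp),
      PySem.Dict.items_insert_of_contains _ _ h,
      PySem.Dict.items_insert_of_contains _ _ h,
      List.map_map]
    apply List.map_congr_left
    intro p _
    by_cases hp : p.1 = k <;> simp [Function.comp, hp]
  · have h' : d.contains k = false := by simpa using h
    rw [PySem.Dict.items_insert_of_contains _ _ (by simp),
      PySem.Dict.items_insert_of_not_contains _ _ h',
      PySem.Dict.items_insert_of_not_contains _ _ h',
      List.map_append]
    have hfresh : ∀ p ∈ d.items, (if (p.1 == k) = true then (k, w) else p) = p := by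
      intro p hp
      have hne : p.1 ≠ k := fun hpk =>
        absurd ((PySem.Dict.contains_iff_mem_keys _ _).mpr (hpk ▸ PySem.Dict.mem_keys_of_mem_items _ hp)) h
      simp [hne]
    rw [List.map_congr_left hfresh, List.map_id']
    simp

theorem pvFold_insert_append (s : List (List Int)) (d : PySem.Dict Int (List (List Int)))
    (n : Int) (v : List (List Int)) :
    s.foldl (fun d c => d.insert n (d.getD n [] ++ [c])) (d.insert n v) = d.insert n (v ++ s) := by
  induction s generalizing v with
  | nil => simp
  | cons c s' ih =>
    simp only [List.foldl_cons, PySem.Dict.getD_insert_self, pvDict_insert_insert]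
    rw [ih]
    simp

theorem pvInnerA_eq (rest : List (List Int)) (d : PySem.Dict Int (List (List Int))) (n fe : Int) :
    pvInnerA d n fe rest =
      ((pvChain fe rest).2.foldl (fun d c => d.insert n (d.getD n [] ++ [c])) d,
       (pvChain fe rest).2) := by
  induction rest generalizing d fe with
  | nil => simp [pvInnerA, pvChain]
  | cons c cs ih =>
    simp only [pvInnerA, pvChain]
    split
    · rw [ih]
      simp
    · exact ih d fe

theorem pvLoopA_items (data : List (List Int)) (d : PySem.Dict Int (List (List Int))) (n : Int)
    (hs : data.Pairwise (fun a b => pvFst a ≤ pvFst b))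
    (hd : ∀ m, n ≤ m → d.contains m = false) :
    (pvLoopA d n data).items = d.items ++ pvNumber n (pvPasses data) := by
  induction data using pvPasses.induct generalizing d n with
  | case1 => simp [pvLoopA, pvPasses, pvNumber]
  | case2 f rest ih =>
    rcases List.pairwise_cons.mp hs with ⟨_, hrest⟩
    have hn : d.contains n = false := hd n le_rfl
    have hgetD : d.getD n [] = [] := PySem.Dict.getD_of_not_contains _ _ hn
    simp only [pvLoopA, pvInnerA_eq, hgetD, List.nil_append]
    rw [pvFold_insert_append]
    rw [pvRemoveAll_chain rest (pvSnd f) hrest]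
    rw [ih _ _ (hrest.sublist (pvResid_sublist _ _)) ?fresh]
    case fresh =>
      intro m hm
      rw [PySem.Dict.contains_insert]
      have h1 : (m == n) = false := by simp; omega
      have h2 := hd m (by omega)
      simp [h1, h2]
    rw [PySem.Dict.items_insert_of_not_contains _ _ hn]
    simp only [pvPasses, pvNumber, List.append_assoc, List.singleton_append]

-- ===== VERDICT (by name: the statement is the Claim_ definition above) =====
theorem divideCoordinatesOverTracks_spec : Claim_equal_divideCoordinatesOverTracks := by
  intro data _ _
  unfold Spec_divideCoordinatesOverTracks divideCoordinatesOverTracks divideCoordinatesOverTracks_alt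
  rw [pvLoopA_items _ _ _ (PySem.List.sorted_pairwise _ _) (fun m _ => PySem.Dict.contains_empty m)]
  rw [pvFoldPlace_eq_passes]
  simp [PySem.Dict.empty]
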